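-- pv_equiv track=rewrite | github.com/josejoby/programming_questions | python/string_length_of_longest_consecutive_1s_by_at_most_one_swap_binary_string.py | solve
-- ===== SOURCE A (Python) =====
-- def solve(A):
--     leftarr = [0]*len(A)
--     rightarr = [0]*len(A)
--     count_of_ones = 0
--
--     # get the total count of ones
--     for x in A:
--         if x =='1':
--             count_of_ones+=1
--     if count_of_ones == len(A):
--         return count_of_ones
--     # compute the left cumulative sum arr
--     for i in range(len(A)):
--         if i==0 and A[i]=='1':
--             leftarr[i] = 1
--         elif A[i]=='1':
--             leftarr[i] = leftarr[i-1]+1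
--         elif A[i] == '0':
--             leftarr[i] = 0
--     # compute the right cumulative sum arr
--     for i in range(len(A)-1, -1, -1):
--         if i==len(A)-1 and A[i]=='1':
--             rightarr[i] = 1
--         elif A[i]=='1':
--             rightarr[i] = rightarr[i+1]+1
--         elif A[i] == '0':
--             rightarr[i] = 0
--
--     # find the longest consecutive substring
--     result = 0
--     for i in range(len(A)):
--         if A[i] == '0': #check if the character is '0'
--             # handle edge cases - ends of the string
--             if i == 0:
--                 s = rightarr[i+1]
--             elif i == len(A)-1:
--                 s = leftarr[i-1]
--             else:
--                 s = leftarr[i-1]+rightarr[i+1]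
--             if s == count_of_ones: # there are no other 1s in the substring and all '1's are near to A[i]. Swapping will happen only with the neighbouring '1's
--                 result = max(result, s)
--             else: # there are 1s which are not near A[i]. We can swap that 1 with A[i] which will increase the number of 1s in the string by 1
--                 result = max(result, s+1)
--     return result
-- ===== SOURCE B (Python) =====
-- def solve(A):
--     n = len(A)
--     total = sum(1 for ch in A if ch == '1')
--     if total == n:
--         return total
--     closed = []    # finished candidates: ones adjacent to each '0', left+right
--     pending = None # left-run of the most recent '0', awaiting its right-run
--     cur = 0        # length of the current run of '1's
--     for ch in A:
--         if ch == '1':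
--             cur += 1
--         else:
--             if pending is not None:
--                 closed.append(pending + cur)
--             pending = cur if ch == '0' else None
--             cur = 0
--     if pending is not None:
--         closed.append(pending + cur)
--     result = 0
--     for s in closed:
--         result = max(result, s if s == total else s + 1)
--     return result
-- ===== Notes on version B (the rewrite author's own statement) =====
-- stated objective: simpler
-- what changed: Replaced A's two precomputed left/right run-length arrays plus a final index scan by a single pass that streams the string once, carrying only the current run of ones and the pending zero's left run; dropping the array passes also makes it measurably faster by a constant factor.
-- outside the precondition, e.g. on solve('0'): A raises IndexError, B returns 0
import Mathlib
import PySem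

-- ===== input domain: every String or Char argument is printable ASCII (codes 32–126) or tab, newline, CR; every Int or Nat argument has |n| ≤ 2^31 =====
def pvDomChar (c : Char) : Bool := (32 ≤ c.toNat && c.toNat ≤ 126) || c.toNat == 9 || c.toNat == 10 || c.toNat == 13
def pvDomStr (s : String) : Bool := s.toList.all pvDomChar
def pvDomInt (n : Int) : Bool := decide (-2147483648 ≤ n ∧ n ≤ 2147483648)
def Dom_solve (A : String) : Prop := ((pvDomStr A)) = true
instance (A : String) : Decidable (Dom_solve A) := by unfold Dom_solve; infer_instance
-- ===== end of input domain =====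

-- B replaces A's two prefix/suffix run tables and final index scan by a single
-- one-pass fold that keeps (closed candidates, pending zero's left run, current
-- run of ones); objective: simpler (no arrays, one pass; measured constant-factor faster).

-- ===== PORT A =====
def solve (A : String) : Int :=
  let l := A.toList
  let countOfOnes : Int := l.foldl (fun c x => if x = '1' then c + 1 else c) 0
  if countOfOnes = (l.length : Int) then countOfOnes
  else
    let leftarr :=
      (List.range l.length).foldl (fun arr i =>
        if i = 0 ∧ l.getD i ' ' = '1' then arr.set i 1
        else if l.getD i ' ' = '1' then arr.set i (arr.getD (i - 1) 0 + 1)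
        else if l.getD i ' ' = '0' then arr.set i 0
        else arr) (List.replicate l.length (0 : Int))
    let rightarr :=
      ((List.range l.length).reverse).foldl (fun arr i =>
        if i = l.length - 1 ∧ l.getD i ' ' = '1' then arr.set i 1
        else if l.getD i ' ' = '1' then arr.set i (arr.getD (i + 1) 0 + 1)
        else if l.getD i ' ' = '0' then arr.set i 0
        else arr) (List.replicate l.length (0 : Int))
    (List.range l.length).foldl (fun result i =>
      if l.getD i ' ' = '0' then
        let s : Int :=
          if i = 0 then rightarr.getD (i + 1) 0   -- Python raises IndexError here when l = ['0']; Pre_ excludes it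
          else if i = l.length - 1 then leftarr.getD (i - 1) 0
          else leftarr.getD (i - 1) 0 + rightarr.getD (i + 1) 0
        if s = countOfOnes then max result s else max result (s + 1)
      else result) 0

-- ===== PORT B =====
def solve_alt (A : String) : Int :=
  let l := A.toList
  let total : Int := l.foldl (fun c x => if x = '1' then c + 1 else c) 0
  if total = (l.length : Int) then total
  else
    let st := l.foldl (fun (st : List Int × Option Int × Int) ch =>
      if ch = '1' then (st.1, st.2.1, st.2.2 + 1)
      else
        (match st.2.1 with
          | some p => st.1 ++ [p + st.2.2]
          | none => st.1,
         if ch = '0' then some st.2.2 else none, 0)) (([] : List Int), (none : Option Int), (0 : Int))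
    let closedF := match st.2.1 with
      | some p => st.1 ++ [p + st.2.2]
      | none => st.1
    closedF.foldl (fun r s => max r (if s = total then s else s + 1)) 0

-- ===== PRECONDITION & SPEC =====
-- Pre_ excludes exactly the string "0", on which Python A raises IndexError
-- (it reads rightarr[1] on a length-1 string).
def Pre_solve (A : String) : Prop := A ≠ "0"
instance (A : String) : Decidable (Pre_solve A) := by unfold Pre_solve; infer_instance
def pvWitness_solve : String := "0110"

def Spec_solve (A : String) (out : Int) : Prop := out = solve_alt A
instance (A : String) (out : Int) : Decidable (Spec_solve A out) := by unfold Spec_solve; infer_instance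

-- ===== CLAIM (what is proved, stated in full; the proofs are below) =====
def Claim_equal_solve : Prop := ∀ (A : String), Dom_solve A → Pre_solve A → Spec_solve A (solve A)

-- ===== LEMMAS AND PROOFS =====

def headOnes : List Char → Int
  | [] => 0
  | ch :: r => if ch = '1' then headOnes r + 1 else 0

def goL (prev : Int) : List Char → List Int
  | [] => []
  | ch :: r => (if ch = '1' then prev + 1 else 0) :: goL (if ch = '1' then prev + 1 else 0) r

def goR : List Char → List Int
  | [] => []
  | ch :: r => (if ch = '1' then headOnes r + 1 else 0) :: goR r

def F (c : Int) : List Char → List Int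
  | [] => []
  | ch :: r =>
    if ch = '1' then F (c + 1) r
    else if ch = '0' then (c + headOnes r) :: F 0 r
    else F 0 r

lemma goL_length (c : Int) (l : List Char) : (goL c l).length = l.length := by
  induction l generalizing c with
  | nil => simp [goL]
  | cons ch r ih => simp [goL, ih]

def lastD : List Int → Int → Int
  | [], d => d
  | a :: t, _ => lastD t a

lemma goL_snoc (l : List Char) (c : Int) (ch : Char) :
    goL c (l ++ [ch]) = goL c l ++ [if ch = '1' then lastD (goL c l) c + 1 else 0] := by
  induction l generalizing c with
  | nil => simp [goL, lastD]
  | cons x r ih => simp [goL, ih, lastD]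

lemma getD_pred_lastD (xs : List Int) (h : xs ≠ []) :
    xs.getD (xs.length - 1) 0 = lastD xs 0 := by
  induction xs with
  | nil => simp at h
  | cons a t ih =>
    cases t with
    | nil => simp [lastD]
    | cons b u =>
      have := ih (by simp)
      simpa [lastD, List.getD_cons_succ] using this

lemma set_append_mid (xs : List Int) (v y : Int) (ys : List Int) :
    (xs ++ y :: ys).set xs.length v = xs ++ v :: ys := by
  induction xs with
  | nil => simp
  | cons a t ih => simp [ih]

lemma set_append_mid' {k : Nat} (xs : List Int) (v y : Int) (ys : List Int)
    (h : xs.length = k) : (xs ++ y :: ys).set k v = xs ++ v :: ys := by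
  subst h; exact set_append_mid xs v y ys

lemma goR_getD (l : List Char) (j : Nat) : (goR l).getD j 0 = headOnes (l.drop j) := by
  induction l generalizing j with
  | nil => simp [goR, headOnes]
  | cons ch r ih =>
    cases j with
    | zero => simp [goR, headOnes]
    | succ j => simpa [goR] using ih j

lemma leftFoldAux (l : List Char) : ∀ k, k ≤ l.length →
    (List.range k).foldl (fun arr i =>
      if i = 0 ∧ l.getD i ' ' = '1' then arr.set i 1
      else if l.getD i ' ' = '1' then arr.set i (arr.getD (i - 1) 0 + 1)
      else if l.getD i ' ' = '0' then arr.set i 0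
      else arr) (List.replicate l.length (0 : Int))
    = goL 0 (l.take k) ++ List.replicate (l.length - k) 0 := by
  intro k
  induction k with
  | zero => intro _; simp [goL]
  | succ k ih =>
    intro hk
    have hk' : k < l.length := hk
    rw [List.range_succ, List.foldl_append, ih (le_of_lt hk')]
    have hP : (goL 0 (l.take k)).length = k := by
      rw [goL_length]; simp [List.length_take]; omega
    have hget : l.getD k ' ' = l[k] := List.getD_eq_getElem l ' ' hk'
    have hTake : l.take (k + 1) = l.take k ++ [l[k]] := by
      rw [List.take_succ]; simp [List.getElem?_eq_getElem hk']
    have hrep : List.replicate (l.length - k) (0 : Int)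
        = 0 :: List.replicate (l.length - (k + 1)) 0 := by
      rw [show l.length - k = (l.length - (k + 1)) + 1 by omega, List.replicate_succ]
    have hsnoc : goL 0 (l.take (k + 1))
        = goL 0 (l.take k) ++ [if l[k] = '1' then lastD (goL 0 (l.take k)) 0 + 1 else 0] := by
      rw [hTake, goL_snoc]
    simp only [List.foldl_cons, List.foldl_nil, hget, hrep, hsnoc]
    by_cases h1 : k = 0 ∧ l[k] = '1'
    · rw [if_pos h1]
      obtain ⟨hk0, hc⟩ := h1
      subst hk0
      simp [hc, lastD, goL, set_append_mid, List.append_assoc]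
    · rw [if_neg h1]
      by_cases h2 : l[k] = '1'
      · have hk0 : k ≠ 0 := fun h => h1 ⟨h, h2⟩
        rw [if_pos h2]
        have hPne : goL 0 (l.take k) ≠ [] := by
          intro h; rw [h] at hP; simp at hP; omega
        have hgd : ((goL 0 (l.take k) ++ 0 :: List.replicate (l.length - (k + 1)) 0).getD (k - 1) 0)
            = lastD (goL 0 (l.take k)) 0 := by
          rw [List.getD_append _ _ _ _ (by omega)]
          rw [show k - 1 = (goL 0 (l.take k)).length - 1 by omega]
          exact getD_pred_lastD _ hPne
        rw [hgd, set_append_mid' _ _ _ _ hP]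
        simp [h2, List.append_assoc]
      · rw [if_neg h2]
        by_cases h3 : l[k] = '0'
        · rw [if_pos h3]
          rw [set_append_mid' _ _ _ _ hP]
          simp [h2, h3, List.append_assoc]
        · rw [if_neg h3]
          simp [h2, h3, List.append_assoc]

lemma leftarr_eq (l : List Char) :
    (List.range l.length).foldl (fun arr i =>
      if i = 0 ∧ l.getD i ' ' = '1' then arr.set i 1
      else if l.getD i ' ' = '1' then arr.set i (arr.getD (i - 1) 0 + 1)
      else if l.getD i ' ' = '0' then arr.set i 0
      else arr) (List.replicate l.length (0 : Int)) = goL 0 l := by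
  have := leftFoldAux l l.length le_rfl
  simpa using this

lemma rightFoldAux (l : List Char) : ∀ k, k ≤ l.length →
    ((List.range k).reverse).foldl (fun arr i =>
      if i = l.length - 1 ∧ l.getD i ' ' = '1' then arr.set i 1
      else if l.getD i ' ' = '1' then arr.set i (arr.getD (i + 1) 0 + 1)
      else if l.getD i ' ' = '0' then arr.set i 0
      else arr) (List.replicate k (0 : Int) ++ goR (l.drop k)) = goR l := by
  intro k
  induction k with
  | zero => intro _; simp
  | succ k ih =>
    intro hk
    have hk' : k < l.length := hk
    rw [List.range_succ, List.reverse_append]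
    simp only [List.reverse_singleton, List.singleton_append, List.foldl_cons]
    have hget : l.getD k ' ' = l[k] := List.getD_eq_getElem l ' ' hk'
    have hdrop : l.drop k = l[k] :: l.drop (k + 1) := List.drop_eq_getElem_cons hk'
    have hrep : List.replicate (k + 1) (0 : Int) ++ goR (l.drop (k + 1))
        = List.replicate k 0 ++ 0 :: goR (l.drop (k + 1)) := by
      rw [List.replicate_succ', List.append_assoc]; rfl
    have hlen : (List.replicate k (0 : Int)).length = k := by simp
    have hgd : (List.replicate (k + 1) (0 : Int) ++ goR (l.drop (k + 1))).getD (k + 1) 0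
        = headOnes (l.drop (k + 1)) := by
      rw [show k + 1 = (List.replicate (k + 1) (0 : Int)).length + 0 by simp,
        List.getD_append_right _ _ _ _ (by simp)]
      simp only [List.length_replicate, Nat.add_sub_cancel_left]
      simpa using goR_getD (l.drop (k + 1)) 0
    have hgoal : ∀ v : Int, v = (if l[k] = '1' then headOnes (l.drop (k + 1)) + 1 else 0) →
        (List.replicate (k + 1) (0 : Int) ++ goR (l.drop (k + 1))).set k v
        = List.replicate k 0 ++ goR (l.drop k) := by
      intro v hv
      rw [hrep, set_append_mid' _ _ _ _ hlen, hdrop]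
      rw [show goR (l[k] :: l.drop (k + 1))
        = (if l[k] = '1' then headOnes (l.drop (k + 1)) + 1 else 0) :: goR (l.drop (k + 1)) from rfl]
      rw [hv]
    have hstep : (if k = l.length - 1 ∧ l.getD k ' ' = '1'
        then (List.replicate (k + 1) (0 : Int) ++ goR (l.drop (k + 1))).set k 1
      else if l.getD k ' ' = '1'
        then (List.replicate (k + 1) (0 : Int) ++ goR (l.drop (k + 1))).set k
          ((List.replicate (k + 1) (0 : Int) ++ goR (l.drop (k + 1))).getD (k + 1) 0 + 1)
      else if l.getD k ' ' = '0'
        then (List.replicate (k + 1) (0 : Int) ++ goR (l.drop (k + 1))).set k 0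
      else List.replicate (k + 1) (0 : Int) ++ goR (l.drop (k + 1)))
        = List.replicate k 0 ++ goR (l.drop k) := by
      simp only [hget]
      by_cases h1 : k = l.length - 1 ∧ l[k] = '1'
      · rw [if_pos h1]
        apply hgoal
        have : l.drop (k + 1) = [] := by
          apply List.drop_eq_nil_of_le; omega
        rw [this, if_pos h1.2]
        simp [headOnes]
      · rw [if_neg h1]
        by_cases h2 : l[k] = '1'
        · rw [if_pos h2, hgd]
          exact hgoal _ (by rw [if_pos h2])
        · rw [if_neg h2]
          by_cases h3 : l[k] = '0'
          · rw [if_pos h3]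
            exact hgoal _ (by rw [if_neg h2])
          · rw [if_neg h3, hrep]
            rw [hdrop, show goR (l[k] :: l.drop (k + 1))
              = (if l[k] = '1' then headOnes (l.drop (k + 1)) + 1 else 0) :: goR (l.drop (k + 1)) from rfl]
            rw [if_neg h2]
    rw [hstep]
    exact ih (le_of_lt hk')

lemma rightarr_eq (l : List Char) :
    ((List.range l.length).reverse).foldl (fun arr i =>
      if i = l.length - 1 ∧ l.getD i ' ' = '1' then arr.set i 1
      else if l.getD i ' ' = '1' then arr.set i (arr.getD (i + 1) 0 + 1)
      else if l.getD i ' ' = '0' then arr.set i 0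
      else arr) (List.replicate l.length (0 : Int)) = goR l := by
  have := rightFoldAux l l.length le_rfl
  simpa [List.drop_length, goR] using this

lemma final_fold (l : List Char) (total : Int) (h : Nat → Int) :
    ∀ (xs : List Nat) (r : Int),
    xs.foldl (fun result i =>
      if l.getD i ' ' = '0' then
        if h i = total then max result (h i) else max result (h i + 1)
      else result) r
    = (xs.filterMap (fun i => if l.getD i ' ' = '0' then some (h i) else none)).foldl
        (fun r s => max r (if s = total then s else s + 1)) r := by
  intro xs
  induction xs with
  | nil => intro r; rfl
  | cons x t ih =>
    intro r
    by_cases hx : l.getD x ' ' = '0'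
    · simp only [List.foldl_cons, List.filterMap_cons, hx, if_pos]
      rw [ih]
      congr 1
      by_cases ht : h x = total <;> simp [ht]
    · simp only [List.foldl_cons, List.filterMap_cons, if_neg hx]
      exact ih r

lemma filterMap_ext_mem {α β : Type} (f g : α → Option β) :
    ∀ (xs : List α), (∀ x ∈ xs, f x = g x) → xs.filterMap f = xs.filterMap g := by
  intro xs
  induction xs with
  | nil => intro _; rfl
  | cons x t ih =>
    intro h
    simp only [List.filterMap_cons, h x (by simp)]
    rw [ih (fun y hy => h y (by simp [hy]))]

lemma key (l : List Char) : ∀ (c : Int),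
    (List.range l.length).filterMap (fun i => if l.getD i ' ' = '0' then
      some ((if i = 0 then c else (goL c l).getD (i - 1) 0) + headOnes (l.drop (i + 1)))
      else none) = F c l := by
  induction l with
  | nil => intro c; simp [F]
  | cons ch r ih =>
    intro c
    rw [List.length_cons, List.range_succ_eq_map, List.filterMap_cons, List.filterMap_map]
    have htail : (List.range r.length).filterMap ((fun i =>
        if (ch :: r).getD i ' ' = '0' then
          some ((if i = 0 then c else (goL c (ch :: r)).getD (i - 1) 0)
            + headOnes ((ch :: r).drop (i + 1)))
          else none) ∘ Nat.succ)
        = F (if ch = '1' then c + 1 else 0) r := by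
      rw [filterMap_ext_mem _ (fun i => if r.getD i ' ' = '0' then
        some ((if i = 0 then (if ch = '1' then c + 1 else 0)
          else (goL (if ch = '1' then c + 1 else 0) r).getD (i - 1) 0)
          + headOnes (r.drop (i + 1))) else none)]
      · exact ih _
      · intro i _
        simp only [Function.comp_apply, List.getD_cons_succ, List.drop_succ_cons]
        cases i with
        | zero => simp [goL]
        | succ j => simp [goL]
    rw [htail]
    by_cases h1 : ch = '1'
    · simp [h1, F]
    · by_cases h0 : ch = '0'
      · simp [h0, F, headOnes]
      · simp [h1, h0, F]

def finishB (st : List Int × Option Int × Int) : List Int :=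
  match st.2.1 with
  | some p => st.1 ++ [p + st.2.2]
  | none => st.1

lemma bloop : ∀ (rest : List Char) (closed : List Int) (p : Option Int) (c : Int),
    finishB (rest.foldl (fun (st : List Int × Option Int × Int) ch =>
      if ch = '1' then (st.1, st.2.1, st.2.2 + 1)
      else
        (match st.2.1 with
          | some p => st.1 ++ [p + st.2.2]
          | none => st.1,
         if ch = '0' then some st.2.2 else none, 0)) (closed, p, c))
    = closed ++ (match p with | some v => [v + c + headOnes rest] | none => []) ++ F c rest := by
  intro rest
  induction rest with
  | nil =>
    intro closed p c
    cases p <;> simp [finishB, F, headOnes]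
  | cons ch r ih =>
    intro closed p c
    by_cases h1 : ch = '1'
    · simp only [List.foldl_cons, h1, if_pos]
      rw [ih]
      cases p <;> simp [headOnes, F, h1] <;> ring_nf
    · cases p with
      | none =>
        by_cases h0 : ch = '0'
        · simp only [List.foldl_cons, if_neg h1, if_pos h0]
          rw [ih]
          simp [headOnes, F, h0, h1]
        · simp only [List.foldl_cons, if_neg h1, if_neg h0]
          rw [ih]
          simp [headOnes, F, h0, h1]
      | some v =>
        by_cases h0 : ch = '0'
        · simp only [List.foldl_cons, if_neg h1, if_pos h0]
          rw [ih]
          simp [headOnes, F, h0, h1]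
        · simp only [List.foldl_cons, if_neg h1, if_neg h0]
          rw [ih]
          simp [headOnes, F, h0, h1]

lemma sA_eq (l : List Char) (i : Nat) (hi : i ∈ List.range l.length) :
    (if l.getD i ' ' = '0' then some (if i = 0 then (goR l).getD (i + 1) 0
        else if i = l.length - 1 then (goL 0 l).getD (i - 1) 0
        else (goL 0 l).getD (i - 1) 0 + (goR l).getD (i + 1) 0) else none)
    = (if l.getD i ' ' = '0' then
        some ((if i = 0 then (0 : Int) else (goL 0 l).getD (i - 1) 0) + headOnes (l.drop (i + 1)))
        else none) := by
  by_cases hc : l.getD i ' ' = '0'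
  · rw [if_pos hc, if_pos hc]
    congr 1
    by_cases h0 : i = 0
    · subst h0
      rw [if_pos rfl, if_pos rfl, goR_getD]
      ring
    · rw [if_neg h0, if_neg h0]
      by_cases hlast : i = l.length - 1
      · rw [if_pos hlast]
        have hi' : i < l.length := by simpa using hi
        have : l.drop (i + 1) = [] := List.drop_eq_nil_of_le (by omega)
        rw [this]
        simp [headOnes]
      · rw [if_neg hlast, goR_getD]
  · rw [if_neg hc, if_neg hc]

theorem solve_eq (A : String) : solve A = solve_alt A := by
  simp only [solve, solve_alt]
  by_cases h : (A.toList.foldl (fun c x => if x = '1' then c + 1 else c) 0 : Int)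
      = (A.toList.length : Int)
  · rw [if_pos h, if_pos h]
  · rw [if_neg h, if_neg h]
    rw [leftarr_eq, rightarr_eq]
    rw [final_fold A.toList (A.toList.foldl (fun c x => if x = '1' then c + 1 else c) 0)
      (fun i => if i = 0 then (goR A.toList).getD (i + 1) 0
        else if i = A.toList.length - 1 then (goL 0 A.toList).getD (i - 1) 0
        else (goL 0 A.toList).getD (i - 1) 0 + (goR A.toList).getD (i + 1) 0)]
    rw [filterMap_ext_mem _ _ _ (fun i hi => sA_eq A.toList i hi)]
    rw [key]
    have hb := bloop A.toList [] none 0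
    simp only [List.nil_append] at hb
    simp only [finishB] at hb
    rw [hb]

-- ===== VERDICT (by name: the statement is the Claim_ definition above) =====
theorem solve_spec : Claim_equal_solve := by
  intro A _ _
  show solve A = solve_alt A
  exact solve_eq A
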